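-- pv_equiv track=rewrite | github.com/sanjaybommalene/practiceproblems | Arrays.py | max_even_sum
-- ===== SOURCE A (Python) =====
-- def max_even_sum(arr):
--     total_sum = sum(num for num in arr if num > 0)
--
--     if total_sum % 2 == 0:
--         return total_sum
--
--     # Find the smallest positive odd and largest negative odd
--     smallest_pos_odd = float('inf')
--     largest_neg_odd = -float('inf')
--
--     for num in arr:
--         if num % 2 != 0:
--             if num > 0 and num < smallest_pos_odd:
--                 smallest_pos_odd = num
--             elif num < 0 and num > largest_neg_odd:
--                 largest_neg_odd = num
--
--     candidates = []
--     if smallest_pos_odd != float('inf'):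
--         candidates.append(total_sum - smallest_pos_odd)
--     if largest_neg_odd != -float('inf'):
--         candidates.append(total_sum + largest_neg_odd)
--
--     return max(candidates) if candidates else 0
-- ===== SOURCE B (Python) =====
-- def max_even_sum(arr):
--     # Parity dynamic program: best achievable even and odd subset sums in one pass.
--     even, odd = 0, None
--     for x in arr:
--         if x % 2 == 0:
--             even = max(even, even + x)
--             odd = None if odd is None else max(odd, odd + x)
--         else:
--             new_even = even if odd is None else max(even, odd + x)
--             new_odd = even + x if odd is None else max(odd, even + x)
--             even, odd = new_even, new_odd
--     return even
-- ===== Notes on version B (the rewrite author's own statement) =====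
-- stated objective: alternative
-- what changed: Replaces A's staged computation (sum the positives, then scan for the smallest positive odd and largest negative odd and take the best candidate) by a single-pass parity dynamic program that maintains the best achievable even and odd subset sums.
import Mathlib
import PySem

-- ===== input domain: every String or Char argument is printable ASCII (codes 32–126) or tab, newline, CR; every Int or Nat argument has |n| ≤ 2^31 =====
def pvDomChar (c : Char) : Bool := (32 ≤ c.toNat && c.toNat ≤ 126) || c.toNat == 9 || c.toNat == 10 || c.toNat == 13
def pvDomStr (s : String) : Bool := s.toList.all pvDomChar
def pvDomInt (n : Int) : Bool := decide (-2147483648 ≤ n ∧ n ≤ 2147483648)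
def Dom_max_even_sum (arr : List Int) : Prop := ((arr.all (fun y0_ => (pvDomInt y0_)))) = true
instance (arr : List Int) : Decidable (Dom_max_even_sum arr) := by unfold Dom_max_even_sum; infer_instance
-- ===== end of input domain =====

-- B replaces A's sum-positives-then-adjust computation by a one-pass parity dynamic program (best even / best odd subset sum); objective: alternative.


-- ===== PORT A =====
-- A's float('inf') / -float('inf') sentinels are ported as Option Int (none = still the sentinel).
def pvLtInf (num : Int) : Option Int → Bool
  | none => true                -- num < float('inf')
  | some s => decide (num < s)

def pvGtNegInf (num : Int) : Option Int → Bool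
  | none => true                -- num > -float('inf')
  | some l => decide (num > l)

-- body of A's for-loop
def pvStep (p : Option Int × Option Int) (num : Int) : Option Int × Option Int :=
  if PySem.Int.mod num 2 ≠ 0 then
    if decide (num > 0) && pvLtInf num p.1 then (some num, p.2)
    else if decide (num < 0) && pvGtNegInf num p.2 then (p.1, some num)
    else p
  else p

def max_even_sum (arr : List Int) : Int :=
  let total_sum := arr.foldl (fun s num => if num > 0 then s + num else s) 0
  if PySem.Int.mod total_sum 2 = 0 then total_sum
  else
    let st := arr.foldl pvStep (none, none)
    let candidates :=
      (match st.1 with | some s => [total_sum - s] | none => []) ++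
      (match st.2 with | some l => [total_sum + l] | none => [])
    match PySem.List.max? candidates (fun x => x) with
    | some m => m
    | none => 0

-- ===== PORT B =====
-- body of B's for-loop: one parity-DP step (odd = None ported as Option Int)
def pvDpStep (st : Int × Option Int) (x : Int) : Int × Option Int :=
  if PySem.Int.mod x 2 = 0 then
    (max st.1 (st.1 + x),
     match st.2 with | none => none | some o => some (max o (o + x)))
  else
    (match st.2 with | none => st.1 | some o => max st.1 (o + x),
     match st.2 with | none => some (st.1 + x) | some o => some (max o (st.1 + x)))

def max_even_sum_alt (arr : List Int) : Int :=
  (arr.foldl pvDpStep (0, none)).1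

-- ===== PRECONDITION & SPEC =====
def Spec_max_even_sum (arr : List Int) (out : Int) : Prop := out = max_even_sum_alt arr
instance (arr : List Int) (out : Int) : Decidable (Spec_max_even_sum arr out) := by unfold Spec_max_even_sum; infer_instance

-- ===== CLAIM (what is proved, stated in full; the proofs are below) =====
def Claim_equal_max_even_sum : Prop := ∀ (arr : List Int), Dom_max_even_sum arr → Spec_max_even_sum arr (max_even_sum arr)

-- ===== LEMMAS AND PROOFS =====

-- running-min step used to characterise A's trackers and B's invariant
def pvRmin (a : Option Int) (x : Int) : Option Int :=
  some (match a with | none => x | some s => min s x)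

-- combine A's two trackers into "least |odd element| seen so far"
def pvComb : Option Int → Option Int → Option Int
  | none, none => none
  | some s, none => some s
  | none, some t => some (-t)
  | some s, some t => some (min s (-t))

-- sum of positives of l (A's total_sum, B's reference quantity)
def pvP (l : List Int) : Int := (l.filter (fun x => decide (x > 0))).sum

-- least absolute value among odd elements of l (none = no odd element)
def pvM (l : List Int) : Option Int :=
  ((l.filter (fun x => decide (PySem.Int.mod x 2 ≠ 0))).map (fun x => |x|)).foldl pvRmin none

lemma total_foldl (l : List Int) : ∀ s : Int,
    l.foldl (fun s num => if num > 0 then s + num else s) s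
      = s + (l.filter (fun x => decide (x > 0))).sum := by
  induction l with
  | nil => intro s; simp
  | cons x t ih =>
    intro s
    by_cases hx : x > 0
    · simp [List.foldl, hx, ih, add_assoc]
    · simp [List.foldl, hx, ih]

lemma parity_lemma (l : List Int) (h : ∀ x ∈ l, 0 < x → x % 2 = 0) :
    (l.filter (fun x => decide (x > 0))).sum % 2 = 0 := by
  induction l with
  | nil => simp
  | cons x t ih =>
    have ht : ∀ x ∈ t, 0 < x → x % 2 = 0 := fun y hy => h y (List.mem_cons_of_mem _ hy)
    by_cases hx : x > 0
    · have hx2 := h x (List.mem_cons_self) hx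
      have hsum := ih ht
      simp only [gt_iff_lt] at hsum
      simp [hx]
      omega
    · simp [hx, ih ht]

lemma step_comb (p : Option Int × Option Int) (x : Int) (hodd : PySem.Int.mod x 2 ≠ 0) :
    pvComb (pvStep p x).1 (pvStep p x).2 = pvRmin (pvComb p.1 p.2) |x| := by
  have hmod : PySem.Int.mod x 2 = x % 2 := PySem.Int.mod_eq_emod_of_pos (by omega)
  rw [hmod] at hodd
  rcases p with ⟨a, b⟩
  have hx0 : x ≠ 0 := by rintro rfl; simp at hodd
  by_cases hpos : 0 < x
  · have habs : |x| = x := abs_of_pos hpos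
    rcases a with _ | s <;> rcases b with _ | t <;>
      simp [pvStep, hodd, pvLtInf, pvGtNegInf, pvComb, pvRmin, hpos, habs] <;>
      first
        | omega
        | (split_ifs <;> simp <;> omega)
  · have hneg : x < 0 := by omega
    have habs : |x| = -x := abs_of_neg hneg
    rcases a with _ | s <;> rcases b with _ | t <;>
      simp [pvStep, hodd, pvLtInf, pvGtNegInf, pvComb, pvRmin, hpos, hneg, habs] <;>
      first
        | omega
        | (split_ifs <;> simp <;> omega)

lemma fold_comb (l : List Int) : ∀ a b : Option Int,
    pvComb (l.foldl pvStep (a, b)).1 (l.foldl pvStep (a, b)).2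
      = ((l.filter (fun x => decide (PySem.Int.mod x 2 ≠ 0))).map (fun x => |x|)).foldl pvRmin
          (pvComb a b) := by
  induction l with
  | nil => intro a b; simp
  | cons x t ih =>
    intro a b
    by_cases hodd : PySem.Int.mod x 2 ≠ 0
    · have hstep := step_comb (a, b) x hodd
      rw [List.filter_cons, if_pos (by simpa using hodd)]
      rcases hst : pvStep (a, b) x with ⟨a', b'⟩
      rw [hst] at hstep
      simp only [List.foldl, List.map_cons, hst]
      rw [ih a' b']
      simp only at hstep
      rw [hstep]
    · have hstep : pvStep (a, b) x = (a, b) := by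
        unfold pvStep; rw [if_neg hodd]
      rw [List.filter_cons, if_neg (by simpa using hodd)]
      simp only [List.foldl, hstep]
      exact ih a b

lemma fst_some_mono (l : List Int) : ∀ (a b : Option Int), a.isSome →
    ((l.foldl pvStep (a, b)).1).isSome := by
  induction l with
  | nil => intro a b h; simpa using h
  | cons x t ih =>
    intro a b h
    rcases hst : pvStep (a, b) x with ⟨a', b'⟩
    have ha' : a'.isSome := by
      have : (pvStep (a, b) x).1.isSome := by
        unfold pvStep; split_ifs <;> simp_all
      rwa [hst] at this
    simpa [List.foldl, hst] using ih a' b' ha'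

lemma step_fst_some (a b : Option Int) (x : Int)
    (hodd : PySem.Int.mod x 2 ≠ 0) (hpos : 0 < x) : ((pvStep (a, b) x).1).isSome := by
  unfold pvStep
  rw [if_pos hodd]
  rcases a with _ | s
  · simp [pvLtInf, hpos]
  · by_cases hlt : x < s
    · simp [pvLtInf, hpos, hlt]
    · have h2 : ¬ x < 0 := by omega
      simp [pvLtInf, pvGtNegInf, hpos, hlt, h2]

lemma fst_some_of_mem (l : List Int) : ∀ (a b : Option Int) (x : Int), x ∈ l →
    PySem.Int.mod x 2 ≠ 0 → 0 < x → ((l.foldl pvStep (a, b)).1).isSome := by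
  induction l with
  | nil => intro a b x hx; simp at hx
  | cons y t ih =>
    intro a b x hx hodd hpos
    rcases hst : pvStep (a, b) y with ⟨a', b'⟩
    rcases List.mem_cons.mp hx with rfl | hxt
    · have ha' : a'.isSome := by
        have := step_fst_some a b x hodd hpos
        rw [hst] at this; exact this
      simp only [List.foldl, hst]
      exact fst_some_mono t a' b' ha'
    · simp only [List.foldl, hst]
      exact ih a' b' x hxt hodd hpos

-- the DP invariant: B's fold state is determined by pvP and pvM
lemma dp_inv (l : List Int) :
    (match pvM l with
     | none => l.foldl pvDpStep (0, none) = (pvP l, none) ∧ pvP l % 2 = 0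
     | some m => 1 ≤ m ∧ m % 2 = 1 ∧
         l.foldl pvDpStep (0, none) =
           (if pvP l % 2 = 0 then (pvP l, some (pvP l - m)) else (pvP l - m, some (pvP l))) : Prop) := by
  induction l using List.reverseRecOn with
  | nil => simp [pvM, pvP]
  | append_singleton t x ih =>
    have hmod : PySem.Int.mod x 2 = x % 2 := PySem.Int.mod_eq_emod_of_pos (by omega)
    have hP : pvP (t ++ [x]) = pvP t + (if x > 0 then x else 0) := by
      by_cases hx : x > 0 <;> simp [pvP, List.filter_append, hx]
    have hfold : (t ++ [x]).foldl pvDpStep (0, none) = pvDpStep (t.foldl pvDpStep (0, none)) x :=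
      List.foldl_append ..
    by_cases hodd : x % 2 = 0
    · -- x even: pvM unchanged, positive sum shifts by max x 0
      have hM : pvM (t ++ [x]) = pvM t := by
        simp [pvM, List.filter_append, hmod, hodd]
      rw [hM]
      rcases hm : pvM t with _ | m <;> rw [hm] at ih
      · obtain ⟨hst, hpar⟩ := ih
        rw [hfold, hst, hP]
        by_cases hx : x > 0 <;>
          simp [pvDpStep, hmod, hodd, hx, Prod.ext_iff] <;>
          first
            | omega
            | (exfalso; omega)
            | (split_ifs <;> omega)
            | (split_ifs <;> simp [Prod.ext_iff] <;> omega)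
      · obtain ⟨hm1, hm2, hst⟩ := ih
        refine ⟨hm1, hm2, ?_⟩
        rw [hfold, hst, hP]
        by_cases hx : x > 0 <;> by_cases hpar : pvP t % 2 = 0 <;>
          simp [pvDpStep, hmod, hodd, hx, hpar, Prod.ext_iff] <;>
          first
            | omega
            | (exfalso; omega)
            | (split_ifs <;> omega)
            | (split_ifs <;> simp [Prod.ext_iff] <;> omega)
    · -- x odd: pvM gains |x|
      have hxo : x % 2 = 1 := by omega
      have hM : pvM (t ++ [x]) = pvRmin (pvM t) |x| := by
        simp [pvM, List.filter_append, hmod, hxo, List.foldl_append]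
      rw [hM]
      rcases hm : pvM t with _ | m <;> rw [hm] at ih <;> simp only [pvRmin]
      · obtain ⟨hst, hpar⟩ := ih
        rcases abs_cases x with ⟨habs, hsx⟩ | ⟨habs, hsx⟩ <;>
          refine ⟨by omega, by omega, ?_⟩ <;>
          rw [hfold, hst, hP] <;>
          by_cases hx : x > 0 <;>
          simp [pvDpStep, hmod, hodd, hx, habs, Prod.ext_iff] <;>
          first
            | omega
            | (exfalso; omega)
            | (split_ifs <;> omega)
            | (split_ifs <;> simp [Prod.ext_iff] <;> omega)
      · obtain ⟨hm1, hm2, hst⟩ := ih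
        rcases abs_cases x with ⟨habs, hsx⟩ | ⟨habs, hsx⟩ <;>
          refine ⟨by omega, by omega, ?_⟩ <;>
          rw [hfold, hst, hP] <;>
          by_cases hx : x > 0 <;> by_cases hpar : pvP t % 2 = 0 <;>
          simp [pvDpStep, hmod, hodd, hx, hpar, habs, Prod.ext_iff] <;>
          first
            | omega
            | (exfalso; omega)
            | (split_ifs <;> omega)
            | (split_ifs <;> simp [Prod.ext_iff] <;> omega)

-- ===== VERDICT (by name: the statement is the Claim_ definition above) =====
theorem max_even_sum_spec : Claim_equal_max_even_sum := by
  intro arr _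
  unfold Spec_max_even_sum max_even_sum max_even_sum_alt
  simp only []
  rw [total_foldl arr 0, zero_add]
  have hdp := dp_inv arr
  set T : Int := (arr.filter (fun x => decide (x > 0))).sum with hT
  have hPT : pvP arr = T := rfl
  have hmodT : PySem.Int.mod T 2 = T % 2 := PySem.Int.mod_eq_emod_of_pos (by omega)
  by_cases heven : T % 2 = 0
  · rw [if_pos (by rw [hmodT]; exact heven)]
    rcases hm : pvM arr with _ | m <;> rw [hm] at hdp
    · rw [hdp.1, hPT]
    · obtain ⟨_, _, hst⟩ := hdp
      rw [hPT] at hst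
      rw [hst, if_pos heven]
  · rw [if_neg (by rw [hmodT]; exact heven)]
    -- an odd positive-sum guarantees a positive odd element
    have hex : ∃ x ∈ arr, 0 < x ∧ x % 2 ≠ 0 := by
      by_contra hno
      push_neg at hno
      exact heven (parity_lemma arr (fun x hx hpos => by
        have := hno x hx hpos; omega))
    rcases hex with ⟨x, hxmem, hxpos, hxodd⟩
    have hxodd' : PySem.Int.mod x 2 ≠ 0 := by
      rw [PySem.Int.mod_eq_emod_of_pos (by omega)]; exact hxodd
    rcases hst : arr.foldl pvStep (none, none) with ⟨a, b⟩
    have hsome : a.isSome := by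
      have := fst_some_of_mem arr none none x hxmem hxodd' hxpos
      rw [hst] at this; exact this
    have hcomb : pvComb a b = pvM arr := by
      have := fold_comb arr none none
      rw [hst] at this
      simpa [pvComb, pvM] using this
    rcases hm : pvM arr with _ | m <;> rw [hm] at hdp
    · exact absurd hdp.2 heven
    · obtain ⟨_, _, hbst⟩ := hdp
      rw [hPT] at hbst
      rw [hbst, if_neg heven]
      rw [hm] at hcomb
      rcases a with _ | s
      · simp at hsome
      · rcases b with _ | t
        · simp [pvComb] at hcomb
          simp [PySem.List.max?_id_cons]
          omega
        · simp [pvComb] at hcomb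
          simp only [PySem.List.max?_id_cons, List.cons_append, List.nil_append]
          simp
          omega
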